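-- pv_equiv track=rewrite | github.com/Matteo-Candi/Master-Thesis | results/test_01/test_01_formatted.py | distPrime
-- ===== SOURCE A (Python) =====
-- def distPrime(arr, allPrimes):
--     list1 = []
--     for i in allPrimes:
--         for j in arr:
--             if j % i == 0:
--                 list1.append(i)
--                 break
--     return list1
-- ===== SOURCE B (Python) =====
-- def distPrime(arr, allPrimes):
--     # Build the set of all positive divisors of each |j| once, then filter
--     # allPrimes by membership; zero in arr makes every candidate divide it.
--     divs = set()
--     has_zero = False
--     for j in arr:
--         if j == 0:
--             has_zero = True
--             continue
--         m = abs(j)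
--         d = 1
--         while d * d <= m:
--             if m % d == 0:
--                 divs.add(d)
--                 divs.add(m // d)
--             d += 1
--     return [i for i in allPrimes if has_zero or abs(i) in divs]
-- ===== Notes on version B (the rewrite author's own statement) =====
-- stated objective: faster
-- what changed: Instead of scanning arr once per candidate prime, B builds the set of all positive divisors of each |arr[j]| once (trial division up to sqrt) and then filters allPrimes by a single set-membership test.
-- crash fix: A raises ZeroDivisionError whenever arr is nonempty and 0 is in allPrimes (j % 0 is evaluated); B returns the normally filtered list there. — e.g. on distPrime([2], [0]): A raises ZeroDivisionError, B returns []
import Mathlib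
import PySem

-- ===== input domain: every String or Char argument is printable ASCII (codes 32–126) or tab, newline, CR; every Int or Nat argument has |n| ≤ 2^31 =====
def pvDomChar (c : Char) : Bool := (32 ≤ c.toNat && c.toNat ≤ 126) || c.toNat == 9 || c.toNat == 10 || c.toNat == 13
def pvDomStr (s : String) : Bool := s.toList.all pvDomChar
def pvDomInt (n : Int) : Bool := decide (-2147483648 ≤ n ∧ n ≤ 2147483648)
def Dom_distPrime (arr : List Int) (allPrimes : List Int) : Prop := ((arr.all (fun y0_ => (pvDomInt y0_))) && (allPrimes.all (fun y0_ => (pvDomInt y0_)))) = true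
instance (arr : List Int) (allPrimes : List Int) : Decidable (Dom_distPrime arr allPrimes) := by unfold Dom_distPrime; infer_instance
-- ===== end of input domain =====

-- B replaces A's scan of arr per candidate by one divisor set built from arr
-- once, then a single membership filter over allPrimes (objective: faster).

-- ===== PORT A =====
-- inner 'for j in arr: if j % i == 0: append; break'
def pvInnerA (i : Int) (list1 : List Int) : List Int → List Int
  | [] => list1
  | j :: rest => if PySem.Int.mod j i = 0 then list1 ++ [i] else pvInnerA i list1 rest

def distPrime (arr : List Int) (allPrimes : List Int) : List Int :=
  allPrimes.foldl (fun list1 i => pvInnerA i list1 arr) []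

-- ===== PORT B =====
-- 'while d*d <= m: if m % d == 0: divs.add(d); divs.add(m//d); d += 1'
-- (m = abs(j) ≥ 1 and d ≥ 1, so Nat arithmetic is exact for Python's % and //)
def pvCollectDivs (m d : Nat) (acc : PySem.Set Int) : PySem.Set Int :=
  if h : 0 < d ∧ d * d ≤ m then
    pvCollectDivs m (d + 1)
      (if m % d = 0 then (acc.add (d : Int)).add ((m / d : Nat) : Int) else acc)
  else acc
termination_by m + 1 - d * d
decreasing_by
  have : d * d < (d + 1) * (d + 1) := by nlinarith [h.1]
  omega

def distPrime_alt (arr : List Int) (allPrimes : List Int) : List Int :=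
  let st := arr.foldl
    (fun (p : PySem.Set Int × Bool) j =>
      if j = 0 then (p.1, true)
      else (pvCollectDivs j.natAbs 1 p.1, p.2))
    (PySem.Set.empty, false)
  allPrimes.filter (fun i => st.2 || st.1.contains ((i.natAbs : Nat) : Int))

-- ===== PRECONDITION & SPEC =====
-- Pre_ excludes exactly the inputs where Python A raises ZeroDivisionError:
-- a nonempty arr with 0 among the candidates (j % 0 is evaluated there).
def Pre_distPrime (arr : List Int) (allPrimes : List Int) : Prop :=
  arr = [] ∨ (0 : Int) ∉ allPrimes
instance (arr : List Int) (allPrimes : List Int) : Decidable (Pre_distPrime arr allPrimes) := by unfold Pre_distPrime; infer_instance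

def pvWitness_distPrime : List Int × List Int := ([6, 10], [2, 3, 7])

-- A raises ZeroDivisionError whenever arr is nonempty and 0 ∈ allPrimes; B returns the filtered list there.
def Raises_distPrime (arr : List Int) (allPrimes : List Int) : Prop :=
  arr ≠ [] ∧ (0 : Int) ∈ allPrimes
instance (arr : List Int) (allPrimes : List Int) : Decidable (Raises_distPrime arr allPrimes) := by unfold Raises_distPrime; infer_instance
def pvRaiseWitness_distPrime : List Int × List Int := ([2], [0])
def pvRaiseWitnessOut_distPrime : List Int := []

def Spec_distPrime (arr : List Int) (allPrimes : List Int) (out : List Int) : Prop := out = distPrime_alt arr allPrimes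
instance (arr : List Int) (allPrimes : List Int) (out : List Int) : Decidable (Spec_distPrime arr allPrimes out) := by unfold Spec_distPrime; infer_instance

-- ===== CLAIM (what is proved, stated in full; the proofs are below) =====
def Claim_equal_distPrime : Prop := ∀ (arr : List Int) (allPrimes : List Int), Dom_distPrime arr allPrimes → Pre_distPrime arr allPrimes → Spec_distPrime arr allPrimes (distPrime arr allPrimes)
def Claim_raises_distPrime : Prop := (∀ (arr : List Int) (allPrimes : List Int), Dom_distPrime arr allPrimes → Raises_distPrime arr allPrimes → ¬ Pre_distPrime arr allPrimes) ∧ (Dom_distPrime (pvRaiseWitness_distPrime.1) (pvRaiseWitness_distPrime.2) ∧ Raises_distPrime (pvRaiseWitness_distPrime.1) (pvRaiseWitness_distPrime.2) ∧ distPrime_alt (pvRaiseWitness_distPrime.1) (pvRaiseWitness_distPrime.2) = pvRaiseWitnessOut_distPrime)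

-- ===== LEMMAS AND PROOFS =====

theorem pvInnerA_eq (i : Int) (list1 : List Int) (arr : List Int) :
    pvInnerA i list1 arr =
      if arr.any (fun j => decide (PySem.Int.mod j i = 0)) then list1 ++ [i] else list1 := by
  induction arr with
  | nil => simp [pvInnerA]
  | cons j rest ih =>
    by_cases h : PySem.Int.mod j i = 0 <;> simp [pvInnerA, h, ih]

theorem distPrime_eq_filter (arr : List Int) (allPrimes : List Int) :
    distPrime arr allPrimes =
      allPrimes.filter (fun i => arr.any (fun j => decide (PySem.Int.mod j i = 0))) := by
  have gen : ∀ (ps acc : List Int),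
      ps.foldl (fun list1 i => pvInnerA i list1 arr) acc =
        acc ++ ps.filter (fun i => arr.any (fun j => decide (PySem.Int.mod j i = 0))) := by
    intro ps
    induction ps with
    | nil => simp
    | cons i rest ih =>
      intro acc
      rw [List.foldl_cons, pvInnerA_eq]
      by_cases h : arr.any (fun j => decide (PySem.Int.mod j i = 0)) <;>
        simp [h, ih]
  simpa using gen allPrimes []

theorem mem_pvCollectDivs (m : Nat) (x : Int) (d : Nat) (acc : PySem.Set Int) (hd : 0 < d) :
    x ∈ pvCollectDivs m d acc ↔
      x ∈ acc ∨ ∃ e : Nat, d ≤ e ∧ e * e ≤ m ∧ m % e = 0 ∧ (x = (e : Int) ∨ x = ((m / e : Nat) : Int)) := by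
  have key : ∀ (k d : Nat) (acc : PySem.Set Int), m + 1 - d * d ≤ k → 0 < d →
      (x ∈ pvCollectDivs m d acc ↔
        x ∈ acc ∨ ∃ e : Nat, d ≤ e ∧ e * e ≤ m ∧ m % e = 0 ∧ (x = (e : Int) ∨ x = ((m / e : Nat) : Int))) := by
    intro k
    induction k with
    | zero =>
      intro d acc hk hd
      have hgt : ¬ (0 < d ∧ d * d ≤ m) := by omega
      rw [pvCollectDivs, dif_neg hgt]
      constructor
      · exact Or.inl
      · rintro (h | ⟨e, hde, hee, _, _⟩)
        · exact h
        · exfalso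
          have : d * d ≤ e * e := Nat.mul_le_mul hde hde
          omega
    | succ k ih =>
      intro d acc hk hd
      by_cases hcond : 0 < d ∧ d * d ≤ m
      · rw [pvCollectDivs, dif_pos hcond]
        have hrec : m + 1 - (d + 1) * (d + 1) ≤ k := by
          have e1 : (d + 1) * (d + 1) = d * d + 2 * d + 1 := by ring
          omega
        rw [ih (d + 1) _ hrec (by omega)]
        have hsplit : ∀ P : Nat → Prop,
            (∃ e, d ≤ e ∧ P e) ↔ P d ∨ ∃ e, d + 1 ≤ e ∧ P e := by
          intro P
          constructor
          · rintro ⟨e, hde, hp⟩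
            rcases Nat.eq_or_lt_of_le hde with h | h
            · exact Or.inl (h ▸ hp)
            · exact Or.inr ⟨e, h, hp⟩
          · rintro (hp | ⟨e, he, hp⟩)
            · exact ⟨d, le_refl d, hp⟩
            · exact ⟨e, by omega, hp⟩
        rw [hsplit (fun e => e * e ≤ m ∧ m % e = 0 ∧ (x = (e : Int) ∨ x = ((m / e : Nat) : Int)))]
        by_cases hmod : m % d = 0
        · simp only [if_pos hmod, PySem.Set.mem_add]
          constructor
          · rintro (((h | h) | h) | h)
            · exact Or.inl h
            · exact Or.inr (Or.inl ⟨hcond.2, hmod, Or.inl h⟩)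
            · exact Or.inr (Or.inl ⟨hcond.2, hmod, Or.inr h⟩)
            · exact Or.inr (Or.inr h)
          · rintro (h | ⟨_, _, (h | h)⟩ | h)
            · exact Or.inl (Or.inl (Or.inl h))
            · exact Or.inl (Or.inl (Or.inr h))
            · exact Or.inl (Or.inr h)
            · exact Or.inr h
        · simp only [if_neg hmod]
          constructor
          · rintro (h | h)
            · exact Or.inl h
            · exact Or.inr (Or.inr h)
          · rintro (h | ⟨_, hm, _⟩ | h)
            · exact Or.inl h
            · exact absurd hm hmod
            · exact Or.inr h
      · rw [pvCollectDivs, dif_neg hcond]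
        constructor
        · exact Or.inl
        · rintro (h | ⟨e, hde, hee, _, _⟩)
          · exact h
          · exfalso
            have : d * d ≤ e * e := Nat.mul_le_mul hde hde
            omega
  exact key (m + 1 - d * d) d acc (le_refl _) hd

-- divisor-pair characterisation: the while loop from d = 1 collects exactly the positive divisors
theorem divisor_char (m : Nat) (x : Int) (hm : 0 < m) :
    (∃ e : Nat, 1 ≤ e ∧ e * e ≤ m ∧ m % e = 0 ∧ (x = (e : Int) ∨ x = ((m / e : Nat) : Int))) ↔
      ∃ k : Nat, 0 < k ∧ k ∣ m ∧ x = (k : Int) := by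
  constructor
  · rintro ⟨e, h1, hee, hmod, hx⟩
    have hdvd : e ∣ m := Nat.dvd_of_mod_eq_zero hmod
    rcases hx with h | h
    · exact ⟨e, h1, hdvd, h⟩
    · refine ⟨m / e, ?_, Nat.div_dvd_of_dvd hdvd, h⟩
      exact Nat.div_pos (Nat.le_of_dvd hm hdvd) (by omega)
  · rintro ⟨k, hk, hdvd, hx⟩
    by_cases hsm : k * k ≤ m
    · exact ⟨k, hk, hsm, Nat.mod_eq_zero_of_dvd hdvd, Or.inl hx⟩
    · set e := m / k with he
      have hek : e * k = m := Nat.div_mul_cancel hdvd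
      have hepos : 0 < e := by
        rcases Nat.eq_zero_or_pos e with h0 | h0
        · rw [h0] at hek; simp at hek; omega
        · exact h0
      have hlt : e < k := by nlinarith
      have hee : e * e ≤ m := by nlinarith
      have hedvd : e ∣ m := Nat.div_dvd_of_dvd hdvd
      refine ⟨e, hepos, hee, Nat.mod_eq_zero_of_dvd hedvd, Or.inr ?_⟩
      have hdiv : m / e = k := by rw [← hek]; exact Nat.mul_div_cancel_left k hepos
      rw [hdiv]; exact hx

-- characterisation of the state built by B's fold over arr
theorem pvState_char (arr : List Int) (acc : PySem.Set Int × Bool) :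
    ((arr.foldl (fun (p : PySem.Set Int × Bool) j =>
        if j = 0 then (p.1, true)
        else (pvCollectDivs j.natAbs 1 p.1, p.2)) acc).2 = true ↔ acc.2 = true ∨ (0 : Int) ∈ arr) ∧
    (∀ x : Int, x ∈ (arr.foldl (fun (p : PySem.Set Int × Bool) j =>
        if j = 0 then (p.1, true)
        else (pvCollectDivs j.natAbs 1 p.1, p.2)) acc).1 ↔
      x ∈ acc.1 ∨ ∃ j ∈ arr, j ≠ 0 ∧ ∃ k : Nat, 0 < k ∧ k ∣ j.natAbs ∧ x = (k : Int)) := by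
  induction arr generalizing acc with
  | nil => simp
  | cons j rest ih =>
    by_cases hj : j = 0
    · subst hj
      simp only [List.foldl_cons, reduceIte]
      refine ⟨?_, ?_⟩
      · rw [(ih (acc.1, true)).1]
        simp
      · intro x
        rw [(ih (acc.1, true)).2 x]
        constructor
        · rintro (h | ⟨j, hj, hne, hk⟩)
          · exact Or.inl h
          · exact Or.inr ⟨j, List.mem_cons_of_mem _ hj, hne, hk⟩
        · rintro (h | ⟨j, hj, hne, hk⟩)
          · exact Or.inl h
          · rcases List.mem_cons.mp hj with h0 | h0
            · exact absurd h0 hne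
            · exact Or.inr ⟨j, h0, hne, hk⟩
    · have hpos : 0 < j.natAbs := Int.natAbs_pos.mpr hj
      simp only [List.foldl_cons, if_neg hj]
      refine ⟨?_, ?_⟩
      · rw [(ih (pvCollectDivs j.natAbs 1 acc.1, acc.2)).1]
        constructor
        · rintro (h | h)
          · exact Or.inl h
          · exact Or.inr (List.mem_cons_of_mem _ h)
        · rintro (h | h)
          · exact Or.inl h
          · rcases List.mem_cons.mp h with h0 | h0
            · exact absurd h0.symm hj
            · exact Or.inr h0
      · intro x
        rw [(ih (pvCollectDivs j.natAbs 1 acc.1, acc.2)).2 x]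
        have hmem := mem_pvCollectDivs j.natAbs x 1 acc.1 (by omega)
        rw [show (∃ e : Nat, 1 ≤ e ∧ e * e ≤ j.natAbs ∧ j.natAbs % e = 0 ∧
              (x = (e : Int) ∨ x = ((j.natAbs / e : Nat) : Int))) ↔
            (∃ k : Nat, 0 < k ∧ k ∣ j.natAbs ∧ x = (k : Int)) from divisor_char j.natAbs x hpos] at hmem
        constructor
        · rintro (h | ⟨j', hj', hne, hk⟩)
          · rcases hmem.mp h with h | h
            · exact Or.inl h
            · exact Or.inr ⟨j, List.mem_cons_self, hj, h⟩
          · exact Or.inr ⟨j', List.mem_cons_of_mem _ hj', hne, hk⟩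
        · rintro (h | ⟨j', hj', hne, hk⟩)
          · exact Or.inl (hmem.mpr (Or.inl h))
          · rcases List.mem_cons.mp hj' with h0 | h0
            · subst h0
              exact Or.inl (hmem.mpr (Or.inr hk))
            · exact Or.inr ⟨j', h0, hne, hk⟩

theorem distPrime_spec : Claim_equal_distPrime := by
  intro arr allPrimes _ hpre
  show distPrime arr allPrimes = distPrime_alt arr allPrimes
  rw [distPrime_eq_filter]
  show _ = List.filter _ allPrimes
  apply List.filter_congr
  intro i hi
  rw [Bool.eq_iff_iff]
  have hst := pvState_char arr (PySem.Set.empty, false)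
  simp only [List.any_eq_true, decide_eq_true_eq, Bool.or_eq_true,
    PySem.Set.contains_iff]
  rw [hst.1, hst.2]
  simp only [PySem.Set.empty, false_or, Bool.false_eq_true, List.mem_nil_iff]
  rcases hpre with hnil | hzero
  · subst hnil
    simp
  · have hi0 : i ≠ 0 := fun h => hzero (h ▸ hi)
    have habs : 0 < i.natAbs := Int.natAbs_pos.mpr hi0
    constructor
    · rintro ⟨j, hj, hmod⟩
      have hdvd : i ∣ j := (PySem.Int.mod_eq_zero_iff_dvd j i).mp hmod
      by_cases h0 : j = 0
      · exact Or.inl (h0 ▸ hj)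
      · exact Or.inr ⟨j, hj, h0, i.natAbs, habs,
          Int.natAbs_dvd_natAbs.mpr hdvd, rfl⟩
    · rintro (h | ⟨j, hj, hne, k, hk, hkd, hkx⟩)
      · exact ⟨0, h, (PySem.Int.mod_eq_zero_iff_dvd 0 i).mpr (dvd_zero i)⟩
      · have hk' : k = i.natAbs := by exact_mod_cast hkx.symm
        subst hk'
        refine ⟨j, hj, (PySem.Int.mod_eq_zero_iff_dvd j i).mpr ?_⟩
        exact Int.natAbs_dvd_natAbs.mp hkd

-- ===== VERDICT (by name: the statement is the Claim_ definition above) =====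

theorem distPrime_raises : Claim_raises_distPrime := by
  unfold Claim_raises_distPrime
  refine ⟨?_, by decide, by decide, ?_⟩
  · intro arr allPrimes _ hr hp
    rcases hr with ⟨hne, hmem⟩
    rcases hp with h | h
    · exact hne h
    · exact h hmem
  · have hcd : pvCollectDivs 2 1 PySem.Set.empty = [(1 : Int), 2] := by
      rw [pvCollectDivs]
      norm_num
      rw [pvCollectDivs]
      norm_num
    show distPrime_alt [2] [0] = []
    simp only [distPrime_alt, List.foldl_cons, List.foldl_nil, if_neg (by norm_num : ¬ (2:Int) = 0)]
    rw [show (2:Int).natAbs = 2 from rfl, hcd]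
    decide

-- sanity check on the crash-fix claim: the raise witness indeed falls outside Pre_
theorem pvRaiseWitness_outside_pre_ok : ¬ Pre_distPrime [2] [0] :=
  distPrime_raises.1 [2] [0] (by decide) (by decide)
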